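-- pv_equiv track=rewrite | github.com/alex-petrov-vt/advent-of-code-2021 | day8.py | get_one_four_seven_eight_patterns
-- ===== SOURCE A (Python) =====
-- NUMBER_OF_SEGMENTS = {
--     0: 6,
--     1: 2,
--     2: 5,
--     3: 5,
--     4: 4,
--     5: 5,
--     6: 6,
--     7: 3,
--     8: 7,
--     9: 6
-- }
--
-- def get_one_four_seven_eight_patterns(words):
--     one_pattern = four_pattern = seven_pattern = eight_pattern = ""
--
--     for word in words:
--         if len(word) == NUMBER_OF_SEGMENTS[1]:
--             one_pattern = word
--         elif len(word) == NUMBER_OF_SEGMENTS[4]: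
--             four_pattern = word
--         elif len(word) == NUMBER_OF_SEGMENTS[7]:
--             seven_pattern = word
--         elif len(word) == NUMBER_OF_SEGMENTS[8]:
--             eight_pattern = word
--
--     return one_pattern, four_pattern, seven_pattern, eight_pattern
-- ===== SOURCE B (Python) =====
-- NUMBER_OF_SEGMENTS = {
--     0: 6, 1: 2, 2: 5, 3: 5, 4: 4, 5: 5, 6: 6, 7: 3, 8: 7, 9: 6
-- }
--
-- def get_one_four_seven_eight_patterns(words):
--     # Four independent back-to-front searches: the first match scanning from the
--     # end is the last match in the original order (lengths 2/4/3/7 are distinct,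
--     # so A's elif chain also just keeps the last word of each length).
--     def last_of_len(n):
--         for w in reversed(words):
--             if len(w) == n:
--                 return w
--         return ""
--     return (last_of_len(NUMBER_OF_SEGMENTS[1]),
--             last_of_len(NUMBER_OF_SEGMENTS[4]),
--             last_of_len(NUMBER_OF_SEGMENTS[7]),
--             last_of_len(NUMBER_OF_SEGMENTS[8]))
-- ===== Notes on version B (the rewrite author's own statement) =====
-- stated objective: alternative
-- what changed: Replaces A's single forward pass with four mutating accumulators by four independent back-to-front first-match searches (one per target length) that return early, with empty-string default.
import Mathlib
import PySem

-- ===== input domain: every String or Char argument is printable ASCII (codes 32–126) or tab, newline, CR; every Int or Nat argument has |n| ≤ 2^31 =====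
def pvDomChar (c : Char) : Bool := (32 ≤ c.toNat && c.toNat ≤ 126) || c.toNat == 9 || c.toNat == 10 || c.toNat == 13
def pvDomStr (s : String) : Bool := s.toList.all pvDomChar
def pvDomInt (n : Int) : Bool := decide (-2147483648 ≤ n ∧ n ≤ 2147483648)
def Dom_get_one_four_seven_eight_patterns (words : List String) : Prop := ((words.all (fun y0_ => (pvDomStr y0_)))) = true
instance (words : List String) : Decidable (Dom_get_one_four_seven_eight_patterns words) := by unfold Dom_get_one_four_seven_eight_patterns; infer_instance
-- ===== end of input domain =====

-- B replaces A's single forward pass with four accumulators by four independent back-to-front first-match searches (alternative; same cost).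


-- ===== PORT A =====
-- NUMBER_OF_SEGMENTS as an association list (dict literal)
def NUMBER_OF_SEGMENTS : PySem.Dict Int Int :=
  PySem.Dict.ofList [(0, 6), (1, 2), (2, 5), (3, 5), (4, 4), (5, 5), (6, 6), (7, 3), (8, 7), (9, 6)]

def get_one_four_seven_eight_patterns (words : List String) : String × String × String × String :=
  words.foldl (fun (st : String × String × String × String) word =>
    let (one_pattern, four_pattern, seven_pattern, eight_pattern) := st
    if PySem.Str.len word = NUMBER_OF_SEGMENTS.getD 1 0 then
      (word, four_pattern, seven_pattern, eight_pattern)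
    else if PySem.Str.len word = NUMBER_OF_SEGMENTS.getD 4 0 then
      (one_pattern, word, seven_pattern, eight_pattern)
    else if PySem.Str.len word = NUMBER_OF_SEGMENTS.getD 7 0 then
      (one_pattern, four_pattern, word, eight_pattern)
    else if PySem.Str.len word = NUMBER_OF_SEGMENTS.getD 8 0 then
      (one_pattern, four_pattern, seven_pattern, word)
    else st) ("", "", "", "")

-- ===== PORT B =====
-- last_of_len: first match scanning the reversed list, "" if none (early return)
def lastOfLen (words : List String) (n : Int) : String :=
  lastOfLenGo n words.reverse
where
  lastOfLenGo (n : Int) : List String → String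
    | [] => ""
    | w :: ws => if PySem.Str.len w = n then w else lastOfLenGo n ws

def get_one_four_seven_eight_patterns_alt (words : List String) : String × String × String × String :=
  (lastOfLen words (NUMBER_OF_SEGMENTS.getD 1 0),
   lastOfLen words (NUMBER_OF_SEGMENTS.getD 4 0),
   lastOfLen words (NUMBER_OF_SEGMENTS.getD 7 0),
   lastOfLen words (NUMBER_OF_SEGMENTS.getD 8 0))

-- ===== PRECONDITION & SPEC =====
def Spec_get_one_four_seven_eight_patterns (words : List String) (out : String × String × String × String) : Prop := out = get_one_four_seven_eight_patterns_alt words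
instance (words : List String) (out : String × String × String × String) : Decidable (Spec_get_one_four_seven_eight_patterns words out) := by unfold Spec_get_one_four_seven_eight_patterns; infer_instance

-- ===== CLAIM (what is proved, stated in full; the proofs are below) =====
def Claim_equal_get_one_four_seven_eight_patterns : Prop := ∀ (words : List String), Dom_get_one_four_seven_eight_patterns words → Spec_get_one_four_seven_eight_patterns words (get_one_four_seven_eight_patterns words)

-- ===== LEMMAS AND PROOFS =====

-- search with a default instead of "" at the end (the loop invariant needs the default to vary)
def lastOfLenD (n : Int) (d : String) : List String → String
  | [] => d
  | w :: ws => if PySem.Str.len w = n then w else lastOfLenD n d ws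

theorem lastOfLenD_append_singleton (n : Int) (d : String) (w : String) (xs : List String) :
    lastOfLenD n d (xs ++ [w]) = lastOfLenD n (if PySem.Str.len w = n then w else d) xs := by
  induction xs with
  | nil => simp [lastOfLenD]
  | cons x xs ih => simp [lastOfLenD, ih]

-- Loop invariant: A's fold from (o,f,s,e) computes the last word of each target
-- length, with the start values as defaults.
theorem pv_loop_inv (words : List String) (o f s e : String) :
    words.foldl (fun (st : String × String × String × String) word =>
      let (one_pattern, four_pattern, seven_pattern, eight_pattern) := st
      if PySem.Str.len word = NUMBER_OF_SEGMENTS.getD 1 0 then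
        (word, four_pattern, seven_pattern, eight_pattern)
      else if PySem.Str.len word = NUMBER_OF_SEGMENTS.getD 4 0 then
        (one_pattern, word, seven_pattern, eight_pattern)
      else if PySem.Str.len word = NUMBER_OF_SEGMENTS.getD 7 0 then
        (one_pattern, four_pattern, word, eight_pattern)
      else if PySem.Str.len word = NUMBER_OF_SEGMENTS.getD 8 0 then
        (one_pattern, four_pattern, seven_pattern, word)
      else st) (o, f, s, e)
    = (lastOfLenD 2 o words.reverse, lastOfLenD 4 f words.reverse,
       lastOfLenD 3 s words.reverse, lastOfLenD 7 e words.reverse) := by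
  have h1 : NUMBER_OF_SEGMENTS.getD 1 0 = 2 := by decide
  have h4 : NUMBER_OF_SEGMENTS.getD 4 0 = 4 := by decide
  have h7 : NUMBER_OF_SEGMENTS.getD 7 0 = 3 := by decide
  have h8 : NUMBER_OF_SEGMENTS.getD 8 0 = 7 := by decide
  induction words generalizing o f s e with
  | nil => simp [lastOfLenD]
  | cons w ws ih =>
    simp only [List.foldl_cons, List.reverse_cons, h1, h4, h7, h8,
      lastOfLenD_append_singleton]
    by_cases c2 : (w.length : Int) = 2
    · have c4 : ¬ (w.length : Int) = 4 := by omega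
      have c3 : ¬ (w.length : Int) = 3 := by omega
      have c7 : ¬ (w.length : Int) = 7 := by omega
      simpa [h1, h4, h7, h8, c2, c4, c3, c7, PySem.Str.len] using ih w f s e
    · by_cases c4 : (w.length : Int) = 4
      · have c3 : ¬ (w.length : Int) = 3 := by omega
        have c7 : ¬ (w.length : Int) = 7 := by omega
        simpa [h1, h4, h7, h8, c2, c4, c3, c7, PySem.Str.len] using ih o w s e
      · by_cases c3 : (w.length : Int) = 3
        · have c7 : ¬ (w.length : Int) = 7 := by omega
          simpa [h1, h4, h7, h8, c2, c4, c3, c7, PySem.Str.len] using ih o f w e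
        · by_cases c7 : (w.length : Int) = 7
          · simpa [h1, h4, h7, h8, c2, c4, c3, c7, PySem.Str.len] using ih o f s w
          · simpa [h1, h4, h7, h8, c2, c4, c3, c7, PySem.Str.len] using ih o f s e

theorem lastOfLen_eq_D (words : List String) (n : Int) :
    lastOfLen words n = lastOfLenD n "" words.reverse := by
  unfold lastOfLen
  induction words.reverse with
  | nil => simp [lastOfLen.lastOfLenGo, lastOfLenD]
  | cons w ws ih => simp [lastOfLen.lastOfLenGo, lastOfLenD, ih]

-- ===== VERDICT (by name: the statement is the Claim_ definition above) =====
theorem get_one_four_seven_eight_patterns_spec : Claim_equal_get_one_four_seven_eight_patterns := by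
  intro words _
  unfold Spec_get_one_four_seven_eight_patterns
  unfold get_one_four_seven_eight_patterns get_one_four_seven_eight_patterns_alt
  have h1 : NUMBER_OF_SEGMENTS.getD 1 0 = 2 := by decide
  have h4 : NUMBER_OF_SEGMENTS.getD 4 0 = 4 := by decide
  have h7 : NUMBER_OF_SEGMENTS.getD 7 0 = 3 := by decide
  have h8 : NUMBER_OF_SEGMENTS.getD 8 0 = 7 := by decide
  rw [pv_loop_inv, h1, h4, h7, h8,
    lastOfLen_eq_D, lastOfLen_eq_D, lastOfLen_eq_D, lastOfLen_eq_D]
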